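-- pv_equiv track=rewrite | github.com/BoilerHAUS/EPSCAxplor | services/api/src/rag/preprocess.py | detect_unions
-- ===== SOURCE A (Python) =====
-- def detect_unions(query: str, known_unions: list[str]) -> list[str]:
--     """Return every known union mentioned in the query, ordered by appearance.
--
--     Matching remains case-insensitive substring search to preserve the current
--     detection semantics, but all matches are retained instead of collapsing to
--     the first union in ``known_unions`` order.
--     """
--     lower = query.lower()
--     matches: list[tuple[int, int, str]] = []
--
--     for index, union in enumerate(known_unions):
--         position = lower.find(union.lower())
--         if position != -1:
--             matches.append((position, index, union))
--
--     matches.sort(key=lambda item: (item[0], item[1]))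
--     return [union for _, _, union in matches]
-- ===== SOURCE B (Python) =====
-- def detect_unions(query: str, known_unions: list[str]) -> list[str]:
--     """Hash-indexed single scan: group the unions by their lowered text, then walk
--     the query once; at each position probe the dict with each distinct pattern
--     length, so every union is emitted at its first match, in (position, index)
--     order, without per-union substring searches and without a final sort."""
--     lower = query.lower()
--     by_low = {}
--     for index, union in enumerate(known_unions):
--         by_low.setdefault(union.lower(), []).append((index, union))
--     lengths = sorted(set(len(low) for low in by_low))
--     result = []
--     for pos in range(len(lower) + 1):
--         if not by_low:
--             break
--         hits = []
--         for length in lengths: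
--             chunk = lower[pos:pos + length]
--             if len(chunk) == length and chunk in by_low:
--                 hits.extend(by_low.pop(chunk))
--         hits.sort(key=lambda hit: hit[0])
--         result.extend(union for _, union in hits)
--     return result
-- ===== Notes on version B (the rewrite author's own statement) =====
-- stated objective: faster
-- what changed: A runs a separate lowercase substring search per union and then sorts the hits by (position, index); B groups the unions in a dict keyed by their lowered text and walks the query once, probing the dict with each distinct pattern length at every position, so each union is emitted at its first match already in (position, index) order with no per-union scan and no final sort.
import Mathlib
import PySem

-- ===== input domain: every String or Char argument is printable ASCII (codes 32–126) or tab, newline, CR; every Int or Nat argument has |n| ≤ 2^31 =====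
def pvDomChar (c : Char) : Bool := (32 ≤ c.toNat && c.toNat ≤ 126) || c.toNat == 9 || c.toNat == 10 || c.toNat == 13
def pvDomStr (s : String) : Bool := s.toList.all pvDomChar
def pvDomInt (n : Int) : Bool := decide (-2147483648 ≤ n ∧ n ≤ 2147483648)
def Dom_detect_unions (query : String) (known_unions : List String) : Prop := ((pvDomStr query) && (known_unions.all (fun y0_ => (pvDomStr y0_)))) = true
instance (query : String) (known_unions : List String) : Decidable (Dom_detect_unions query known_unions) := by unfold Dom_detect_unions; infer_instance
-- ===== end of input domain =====

-- B replaces A's "find each union separately, then sort by (position, index)" with a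
-- dict of unions keyed by lowered text and ONE left-to-right scan of the query (probing
-- the dict with each distinct pattern length per position), emitting each union at its
-- first match; measured faster at scale; equivalence is proved for every input (no precondition).

-- ===== PORT A =====
def detect_unions (query : String) (known_unions : List String) : List String :=
  let lower := PySem.Str.lower query
  let matchesList : List (Int × Int × String) :=
    (PySem.List.enumerate known_unions).foldl
      (fun matchesList p =>
        let position := PySem.Str.find lower (PySem.Str.lower p.2)
        if position ≠ -1 then matchesList ++ [(position, p.1, p.2)] else matchesList)
      []
  (PySem.List.sorted2 matchesList (fun item => item.1) (fun item => item.2.1)).map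
    (fun t => t.2.2)

-- ===== PORT B =====
-- build `by_low`: the unions grouped by their lowered text (setdefault+append = modify-append)
def altGroup (known_unions : List String) : PySem.Dict (List Char) (List (Int × String)) :=
  (PySem.List.enumerate known_unions).foldl
    (fun d e => d.modify (PySem.Chars.lower e.2.toList) [] (fun b => b ++ [e]))
    PySem.Dict.empty

-- `lengths = sorted(set(len(low) for low in by_low))`
def altLengths (d : PySem.Dict (List Char) (List (Int × String))) : List Nat :=
  PySem.List.sorted (PySem.Set.ofList (d.keys.map (fun k => k.length))) (fun x => x) false

-- one body of B's inner `for length in lengths` loop; `hits.extend(by_low.pop(chunk))`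
-- is ported as getD + erase, and `lower[pos:pos+length]` with 0 ≤ pos and 0 ≤ length
-- is exactly drop-then-take
def altHitsStep (l : List Char) (pos : Nat)
    (acc : List (Int × String) × PySem.Dict (List Char) (List (Int × String))) (length : Nat) :
    List (Int × String) × PySem.Dict (List Char) (List (Int × String)) :=
  let chunk := (l.drop pos).take length
  if chunk.length = length ∧ acc.2.contains chunk = true then
    (acc.1 ++ acc.2.getD chunk [], acc.2.erase chunk)
  else acc

-- B's `for pos in range(len(lower) + 1)` loop with the early `break`
def altScan (l : List Char) (lengths : List Nat) (fuel pos : Nat)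
    (d : PySem.Dict (List Char) (List (Int × String))) (result : List String) : List String :=
  match fuel with
  | 0 => result
  | fuel + 1 =>
    if d.items.isEmpty then result
    else
      let st := lengths.foldl (altHitsStep l pos) ([], d)
      let hits := PySem.List.sorted st.1 (fun hit => hit.1) false
      altScan l lengths fuel (pos + 1) st.2 (result ++ hits.map (fun hit => hit.2))

def detect_unions_alt (query : String) (known_unions : List String) : List String :=
  let l := (PySem.Str.lower query).toList
  let by_low := altGroup known_unions
  altScan l (altLengths by_low) (l.length + 1) 0 by_low []

-- ===== PRECONDITION & SPEC =====
def Spec_detect_unions (query : String) (known_unions : List String) (out : List String) : Prop := out = detect_unions_alt query known_unions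
instance (query : String) (known_unions : List String) (out : List String) : Decidable (Spec_detect_unions query known_unions out) := by unfold Spec_detect_unions; infer_instance

-- ===== CLAIM (what is proved, stated in full; the proofs are below) =====
def Claim_equal_detect_unions : Prop := ∀ (query : String) (known_unions : List String), Dom_detect_unions query known_unions → Spec_detect_unions query known_unions (detect_unions query known_unions)

-- ===== LEMMAS AND PROOFS =====

-- Proof-side normal form: emit, position by position, the triples whose first-match
-- position is the current one; both programs' outputs reduce to it.
def buildT (fuel : Nat) (pos : Int) (ms : List (Int × Int × String)) :
    List (Int × Int × String) :=
  match fuel with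
  | 0 => []
  | f + 1 =>
    ms.filter (fun t => decide (t.1 = pos)) ++
      buildT f (pos + 1) (ms.filter (fun t => !decide (t.1 = pos)))

def buildP (fuel : Nat) (pos : Int) (ms : List (Int × String)) : List String :=
  match fuel with
  | 0 => []
  | f + 1 =>
    (ms.filter (fun t => decide (t.1 = pos))).map (fun t => t.2) ++
      buildP f (pos + 1) (ms.filter (fun t => !decide (t.1 = pos)))

def gmap (l : List Char) (p : String × List Char) : Option (Int × String) :=
  if PySem.Chars.find l p.2 ≠ -1 then some (PySem.Chars.find l p.2, p.1) else none

lemma buildP_nil (fuel : Nat) (pos : Int) : buildP fuel pos [] = [] := by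
  induction fuel generalizing pos with
  | zero => rfl
  | succ f ih => simp [buildP, ih]

lemma buildT_perm (fuel : Nat) (pos : Int) (ms : List (Int × Int × String))
    (hb : ∀ t ∈ ms, pos ≤ t.1 ∧ t.1 < pos + fuel) : (buildT fuel pos ms).Perm ms := by
  induction fuel generalizing pos ms with
  | zero =>
    have : ms = [] := by
      cases ms with
      | nil => rfl
      | cons t ts => exact absurd (hb t (by simp)) (by omega)
    simp [buildT, this]
  | succ f ih =>
    have h1 : (buildT f (pos + 1) (ms.filter (fun t => !decide (t.1 = pos)))).Perm
        (ms.filter (fun t => !decide (t.1 = pos))) := by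
      apply ih
      intro t ht
      have hm := List.of_mem_filter ht
      have := hb t (List.mem_of_mem_filter ht)
      simp at hm
      omega
    exact (h1.append_left _).trans (List.filter_append_perm _ ms)

lemma buildT_mem (fuel : Nat) (pos : Int) (ms : List (Int × Int × String))
    (t : Int × Int × String) (ht : t ∈ buildT fuel pos ms) : t ∈ ms := by
  induction fuel generalizing pos ms with
  | zero => simp [buildT] at ht
  | succ f ih =>
    simp only [buildT, List.mem_append] at ht
    rcases ht with h | h
    · exact List.mem_of_mem_filter h
    · exact List.mem_of_mem_filter (ih _ _ h)

lemma buildT_pairwise (fuel : Nat) (pos : Int) (ms : List (Int × Int × String))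
    (hb : ∀ t ∈ ms, pos ≤ t.1)
    (hp : ms.Pairwise (fun a b => a.2.1 < b.2.1)) :
    (buildT fuel pos ms).Pairwise
      (fun a b => toLex (a.1, a.2.1) < toLex (b.1, b.2.1)) := by
  induction fuel generalizing pos ms with
  | zero => simp [buildT]
  | succ f ih =>
    simp only [buildT]
    rw [List.pairwise_append]
    refine ⟨?_, ?_, ?_⟩
    · apply List.Pairwise.imp_of_mem _ (hp.filter _)
      intro a b ha hb' hab
      have ha1 : a.1 = pos := by have := List.of_mem_filter ha; simpa using this
      have hb1 : b.1 = pos := by have := List.of_mem_filter hb'; simpa using this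
      rw [Prod.Lex.lt_iff]
      simp only [ofLex_toLex]
      exact Or.inr ⟨by omega, hab⟩
    · apply ih (pos + 1)
      · intro t ht
        have hm := List.of_mem_filter ht
        have := hb t (List.mem_of_mem_filter ht)
        simp at hm
        omega
      · exact hp.filter _
    · intro a ha b hb'
      have ha1 : a.1 = pos := by
        have := List.of_mem_filter ha; simpa using this
      have hb1 : pos + 1 ≤ b.1 := by
        have hmem := buildT_mem _ _ _ _ hb'
        have h2 := List.of_mem_filter hmem
        have h3 := hb b (List.mem_of_mem_filter hmem)
        simp at h2
        omega
      rw [Prod.Lex.lt_iff]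
      simp only [ofLex_toLex]
      exact Or.inl (by omega)

lemma sorted2_eq_sorted_lex {α : Type} (xs : List α) (k1 k2 : α → Int) :
    PySem.List.sorted2 xs k1 k2 =
      PySem.List.sorted xs (fun a => toLex (k1 a, k2 a)) := by
  have hfun : (fun (a b : α) => decide (k1 a < k1 b) || (!decide (k1 b < k1 a) && decide (k2 a < k2 b)))
      = (fun a b => decide (toLex (k1 a, k2 a) < toLex (k1 b, k2 b))) := by
    funext a b
    rw [Bool.eq_iff_iff]
    simp only [Bool.or_eq_true, Bool.and_eq_true, Bool.not_eq_true', decide_eq_true_eq,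
      decide_eq_false_iff_not, Prod.Lex.lt_iff, ofLex_toLex]
    constructor
    · rintro (h | ⟨h1, h2⟩)
      · exact Or.inl h
      · rcases lt_or_eq_of_le (not_lt.mp h1) with h3 | h3
        · exact Or.inl h3
        · exact Or.inr ⟨h3, h2⟩
    · rintro (h | ⟨h1, h2⟩)
      · exact Or.inl h
      · exact Or.inr ⟨not_lt.mpr (le_of_eq h1), h2⟩
  unfold PySem.List.sorted2 PySem.List.sorted
  simp only [Bool.false_eq_true, if_false, hfun]

lemma sorted2_eq_buildT (ms : List (Int × Int × String)) (L : Nat)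
    (hb : ∀ t ∈ ms, 0 ≤ t.1 ∧ t.1 ≤ (L : Int))
    (hp : ms.Pairwise (fun a b => a.2.1 < b.2.1)) :
    PySem.List.sorted2 ms (fun t => t.1) (fun t => t.2.1) = buildT (L + 1) 0 ms := by
  rw [sorted2_eq_sorted_lex]
  apply PySem.List.sorted_eq_of_perm_of_pairwise_lt
  · exact buildT_perm _ _ _ (by intro t ht; have := hb t ht; omega)
  · exact buildT_pairwise _ _ _ (by intro t ht; exact (hb t ht).1) hp

lemma buildT_map (fuel : Nat) (pos : Int) (ms : List (Int × Int × String)) :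
    (buildT fuel pos ms).map (fun t => t.2.2) =
      buildP fuel pos (ms.map (fun t => (t.1, t.2.2))) := by
  induction fuel generalizing pos ms with
  | zero => rfl
  | succ f ih =>
    simp only [buildT, buildP, List.map_append, ih, List.filter_map, List.map_map]
    rfl

lemma match_at_iff (l ul : List Char) (pos : Nat)
    (hinv : ∀ i < pos, ¬ ul <+: l.drop i) :
    (PySem.Chars.startswith (l.drop pos) ul = true) ↔
      PySem.Chars.find l ul = (pos : Int) := by
  rw [PySem.Chars.startswith_iff]
  constructor
  · intro hpre
    have hinf : ul <:+: l := hpre.isInfix.trans (List.drop_suffix pos l).isInfix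
    have h0 : 0 ≤ PySem.Chars.find l ul := (PySem.Chars.find_nonneg_iff l ul).mpr hinf
    obtain ⟨hat, hmin⟩ := PySem.Chars.find_spec h0
    have h1 : ¬ (PySem.Chars.find l ul).toNat < pos := fun h => hinv _ h hat
    have h2 : ¬ pos < (PySem.Chars.find l ul).toNat := fun h => hmin pos h hpre
    omega
  · intro hf
    have h0 : 0 ≤ PySem.Chars.find l ul := by omega
    obtain ⟨hat, -⟩ := PySem.Chars.find_spec h0
    have : (PySem.Chars.find l ul).toNat = pos := by omega
    rwa [this] at hat

lemma filter_gmap (l : List Char) (pos : Nat) (P : List (String × List Char))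
    (hinv : ∀ p ∈ P, ∀ i < pos, ¬ p.2 <+: l.drop i) :
    ((P.filterMap (gmap l)).filter (fun t => decide (t.1 = (pos : Int)))).map (fun t => t.2)
        = (P.filter (fun p => PySem.Chars.startswith (l.drop pos) p.2)).map (fun p => p.1)
    ∧ (P.filter (fun p => !PySem.Chars.startswith (l.drop pos) p.2)).filterMap (gmap l)
        = (P.filterMap (gmap l)).filter (fun t => !decide (t.1 = (pos : Int))) := by
  induction P with
  | nil => simp
  | cons p P ih =>
    obtain ⟨ih1, ih2⟩ := ih (fun q hq => hinv q (List.mem_cons_of_mem _ hq))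
    have hiff := match_at_iff l p.2 pos (hinv p List.mem_cons_self)
    by_cases hs : PySem.Chars.startswith (l.drop pos) p.2 = true
    · have hf : PySem.Chars.find l p.2 = (pos : Int) := hiff.mp hs
      have hne : PySem.Chars.find l p.2 ≠ -1 := by omega
      have hg : gmap l p = some (PySem.Chars.find l p.2, p.1) := by simp [gmap, hne]
      refine ⟨?_, ?_⟩ <;> simp [hg, hs, hf, ih1, ih2]
    · have hf : PySem.Chars.find l p.2 ≠ (pos : Int) := fun h => hs (hiff.mpr h)
      by_cases hne : PySem.Chars.find l p.2 = -1
      · have hg : gmap l p = none := by simp [gmap, hne]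
        refine ⟨?_, ?_⟩ <;> simp [hg, hs, ih1, ih2]
      · have hg : gmap l p = some (PySem.Chars.find l p.2, p.1) := by simp [gmap, hne]
        refine ⟨?_, ?_⟩ <;> simp [hg, hs, hf, ih1, ih2]

lemma enum_proj {β : Type} (ku : List String) (s : Int) (q : String → Bool)
    (k : String → β) :
    ((PySem.List.enumerate ku s).filter (fun p => q p.2)).map (fun p => k p.2)
      = ku.filterMap (fun u => if q u then some (k u) else none) := by
  induction ku generalizing s with
  | nil => simp [PySem.List.enumerate_nil]
  | cons u ku ih =>
    rw [PySem.List.enumerate_cons]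
    by_cases hq : q u
    · simp [hq, ih]
    · simp [hq, ih]

-- ===== VERDICT (by name: the statement is the Claim_ definition above) =====

def lowKey (e : Int × String) : List Char := PySem.Chars.lower e.2.toList

def matchB (l : List Char) (pos : Nat) (e : Int × String) : Bool :=
  PySem.Chars.startswith (l.drop pos) (lowKey e)

-- the dict is exactly the grouping of the remaining entry list R by lowered text
def GoodDict (R : List (Int × String)) (d : PySem.Dict (List Char) (List (Int × String))) : Prop :=
  (∀ k, d.getD k [] = R.filter (fun e => lowKey e == k)) ∧
  (∀ k, d.contains k = !(R.filter (fun e => lowKey e == k)).isEmpty)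

lemma erase_get? (d : PySem.Dict (List Char) (List (Int × String))) (k k' : List Char) :
    (d.erase k).get? k' = if k' = k then none else d.get? k' := by
  rcases d with ⟨items⟩
  simp only [PySem.Dict.erase, PySem.Dict.get?]
  induction items with
  | nil => simp
  | cons p ps ih =>
    by_cases h1 : p.1 = k
    · by_cases h2 : p.1 = k' <;> simp_all
    · by_cases h2 : p.1 = k' <;> simp_all

lemma erase_getD (d : PySem.Dict (List Char) (List (Int × String))) (k k' : List Char) :
    (d.erase k).getD k' [] = if k' = k then [] else d.getD k' [] := by
  rw [PySem.Dict.getD_eq_get?_getD, PySem.Dict.getD_eq_get?_getD, erase_get?]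
  split_ifs <;> rfl

lemma erase_contains (d : PySem.Dict (List Char) (List (Int × String))) (k k' : List Char) :
    (d.erase k).contains k' = if k' = k then false else d.contains k' := by
  rw [PySem.Dict.contains_eq_isSome_get?, PySem.Dict.contains_eq_isSome_get?, erase_get?]
  split_ifs <;> rfl

lemma good_empty (R : List (Int × String)) (d : PySem.Dict (List Char) (List (Int × String)))
    (hG : GoodDict R d) (hE : d.items.isEmpty = true) : R = [] := by
  cases R with
  | nil => rfl
  | cons e R =>
    exfalso
    have hc := (hG.2 (lowKey e))
    have hfalse : d.contains (lowKey e) = false := by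
      rcases d with ⟨items⟩
      have : items = [] := List.isEmpty_iff.mp hE
      simp [PySem.Dict.contains, this]
    rw [hfalse] at hc
    simp at hc

lemma group_good (ku : List String) :
    GoodDict (PySem.List.enumerate ku 0) (altGroup ku) := by
  have hfold : altGroup ku
      = ((PySem.List.enumerate ku 0).map (fun e => (lowKey e, e))).foldl
          (fun d p => d.modify p.1 [] (fun b => b ++ [p.2])) PySem.Dict.empty := by
    rw [List.foldl_map]
    rfl
  constructor
  · intro k
    rw [hfold, PySem.Dict.getD_foldl_modify_append, PySem.Dict.getD_empty, List.nil_append,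
      List.filter_map, List.map_map]
    simp [Function.comp_def]
  · intro k
    have hkeys : (altGroup ku).keys = PySem.Set.update (PySem.Dict.empty
        (κ := List Char) (ν := List (Int × String))).keys
        ((PySem.List.enumerate ku 0).map (fun e => lowKey e)) := by
      unfold altGroup
      exact PySem.Dict.keys_foldl_modify_key _ _ _ (fun _ e => fun b => b ++ [e]) _
    have hmem : (altGroup ku).contains k = true ↔ k ∈ (PySem.List.enumerate ku 0).map (fun e => lowKey e) := by
      rw [PySem.Dict.contains_iff_mem_keys, hkeys, PySem.Set.mem_update, PySem.Dict.keys_empty]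
      simp
    have hfil : ((PySem.List.enumerate ku 0).filter (fun e => lowKey e == k)).isEmpty = false
        ↔ k ∈ (PySem.List.enumerate ku 0).map (fun e => lowKey e) := by
      rw [List.isEmpty_eq_false_iff_exists_mem]
      constructor
      · rintro ⟨e, he⟩
        have h1 := List.mem_of_mem_filter he
        have h2 := List.of_mem_filter he
        simp only [beq_iff_eq] at h2
        exact List.mem_map.mpr ⟨e, h1, h2⟩
      · rintro he
        obtain ⟨e, he1, he2⟩ := List.mem_map.mp he
        exact ⟨e, List.mem_filter.mpr ⟨he1, by simp [he2]⟩⟩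
    rcases h : (altGroup ku).contains k with _ | _
    · rcases h2 : ((PySem.List.enumerate ku 0).filter (fun e => lowKey e == k)).isEmpty with _ | _
      · rw [hfil] at h2; rw [← hmem] at h2; rw [h] at h2; exact absurd h2 (by simp)
      · rfl
    · rw [hmem] at h
      rw [← hfil] at h
      rw [h]
      rfl

lemma lengths_mem (ku : List String) (e : Int × String)
    (he : e ∈ PySem.List.enumerate ku 0) :
    (lowKey e).length ∈ altLengths (altGroup ku) := by
  have hc : (altGroup ku).contains (lowKey e) = true := by
    rw [(group_good ku).2]
    have : e ∈ (PySem.List.enumerate ku 0).filter (fun x => lowKey x == lowKey e) :=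
      List.mem_filter.mpr ⟨he, by simp⟩
    rcases h : ((PySem.List.enumerate ku 0).filter (fun x => lowKey x == lowKey e)).isEmpty with _ | _
    · rfl
    · rw [List.isEmpty_iff] at h; rw [h] at this; simp at this
  have hk : lowKey e ∈ (altGroup ku).keys := (PySem.Dict.contains_iff_mem_keys _ _).mp hc
  unfold altLengths
  rw [PySem.List.mem_sorted, PySem.Set.mem_ofList]
  exact List.mem_map.mpr ⟨lowKey e, hk, rfl⟩

lemma fold_hits (l : List Char) (pos : Nat) :
    ∀ (Ls : List Nat) (R : List (Int × String)) (d : PySem.Dict (List Char) (List (Int × String)))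
      (h0 : List (Int × String)), GoodDict R d →
      ∃ E d',
        Ls.foldl (altHitsStep l pos) (h0, d) = (h0 ++ E, d') ∧
        E.Perm (R.filter (fun e => matchB l pos e && decide ((lowKey e).length ∈ Ls))) ∧
        GoodDict (R.filter (fun e => !(matchB l pos e && decide ((lowKey e).length ∈ Ls)))) d' := by
  intro Ls
  induction Ls with
  | nil =>
    intro R d h0 hG
    refine ⟨[], d, by simp, by simp, ?_⟩
    have : R.filter (fun e => !(matchB l pos e && decide ((lowKey e).length ∈ ([] : List Nat)))) = R := by
      apply List.filter_eq_self.mpr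
      intro e _
      simp
    rwa [this]
  | cons L Ls ih =>
    intro R d h0 hG
    by_cases hcond : ((l.drop pos).take L).length = L ∧ d.contains ((l.drop pos).take L) = true
    · have hkey : ∀ e : Int × String,
          (lowKey e == (l.drop pos).take L) = (matchB l pos e && ((lowKey e).length == L)) := by
        intro e
        rw [Bool.eq_iff_iff]
        simp only [beq_iff_eq, Bool.and_eq_true, matchB,
          PySem.Chars.startswith_iff]
        constructor
        · intro h
          rw [h]
          exact ⟨List.take_prefix _ _, hcond.1⟩
        · rintro ⟨hpre, hlen⟩
          have := List.prefix_iff_eq_take.mp hpre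
          rwa [hlen] at this
      have hnotkey : ∀ (e : Int × String) (k : List Char), lowKey e = k → k ≠ (l.drop pos).take L →
          (matchB l pos e && ((lowKey e).length == L)) = false := by
        intro e k h3 hk
        rw [← hkey e, h3]
        simp [hk]
      have hB : d.getD ((l.drop pos).take L) []
          = R.filter (fun e => matchB l pos e && ((lowKey e).length == L)) := by
        rw [hG.1]
        exact List.filter_congr (fun e _ => hkey e)
      have hstep : altHitsStep l pos (h0, d) L
          = (h0 ++ d.getD ((l.drop pos).take L) [], d.erase ((l.drop pos).take L)) := by
        simp only [altHitsStep]
        rw [if_pos hcond]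
      have hmidfil : ∀ k : List Char, k ≠ (l.drop pos).take L →
          (R.filter (fun e => !(matchB l pos e && ((lowKey e).length == L)))).filter
              (fun e => lowKey e == k)
            = R.filter (fun e => lowKey e == k) := by
        intro k hk
        rw [List.filter_filter]
        apply List.filter_congr
        intro e _
        rcases h2 : (lowKey e == k) with _ | _
        · simp
        · have h3 : lowKey e = k := by simpa using h2
          rw [hnotkey e k h3 hk]
          simp
      have hchunkfil :
          (R.filter (fun e => !(matchB l pos e && ((lowKey e).length == L)))).filter
              (fun e => lowKey e == (l.drop pos).take L) = [] := by
        rw [List.filter_filter]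
        apply List.filter_eq_nil_iff.mpr
        intro e _
        rw [hkey e]
        cases matchB l pos e && ((lowKey e).length == L) <;> simp
      have hGmid : GoodDict (R.filter (fun e => !(matchB l pos e && ((lowKey e).length == L))))
          (d.erase ((l.drop pos).take L)) := by
        constructor
        · intro k
          rw [erase_getD]
          by_cases hk : k = (l.drop pos).take L
          · rw [if_pos hk, hk, hchunkfil]
          · rw [if_neg hk, hmidfil k hk, hG.1]
        · intro k
          rw [erase_contains]
          by_cases hk : k = (l.drop pos).take L
          · rw [if_pos hk, hk, hchunkfil]
            rfl
          · rw [if_neg hk, hmidfil k hk, hG.2]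
      obtain ⟨E, d', hfold, hperm, hG'⟩ := ih _ _ (h0 ++ d.getD ((l.drop pos).take L) []) hGmid
      refine ⟨d.getD ((l.drop pos).take L) [] ++ E, d', ?_, ?_, ?_⟩
      · rw [List.foldl_cons, hstep, hfold, List.append_assoc]
      · rw [hB]
        have hX : (R.filter (fun e => matchB l pos e && decide ((lowKey e).length ∈ L :: Ls))).filter
              (fun e => (lowKey e).length == L)
            = R.filter (fun e => matchB l pos e && ((lowKey e).length == L)) := by
          rw [List.filter_filter]
          apply List.filter_congr
          intro e _
          rcases hm : matchB l pos e with _ | _ <;> rcases hl : ((lowKey e).length == L) with _ | _ <;>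
            simp_all [List.mem_cons]
        have hY : (R.filter (fun e => matchB l pos e && decide ((lowKey e).length ∈ L :: Ls))).filter
              (fun e => !((lowKey e).length == L))
            = (R.filter (fun e => !(matchB l pos e && ((lowKey e).length == L)))).filter
              (fun e => matchB l pos e && decide ((lowKey e).length ∈ Ls)) := by
          rw [List.filter_filter, List.filter_filter]
          apply List.filter_congr
          intro e _
          rcases hm : matchB l pos e with _ | _ <;> rcases hl : ((lowKey e).length == L) with _ | _ <;>
            simp_all [List.mem_cons]
        have hperm2 : (R.filter (fun e => matchB l pos e && ((lowKey e).length == L)) ++ E).Perm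
            ((R.filter (fun e => matchB l pos e && decide ((lowKey e).length ∈ L :: Ls))).filter
                (fun e => (lowKey e).length == L)
              ++ (R.filter (fun e => matchB l pos e && decide ((lowKey e).length ∈ L :: Ls))).filter
                (fun e => !((lowKey e).length == L))) := by
          rw [hX, hY]
          exact hperm.append_left _
        exact hperm2.trans (List.filter_append_perm _ _)
      · have hZ : R.filter (fun e => !(matchB l pos e && decide ((lowKey e).length ∈ L :: Ls)))
            = (R.filter (fun e => !(matchB l pos e && ((lowKey e).length == L)))).filter
              (fun e => !(matchB l pos e && decide ((lowKey e).length ∈ Ls))) := by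
          rw [List.filter_filter]
          apply List.filter_congr
          intro e _
          rcases hm : matchB l pos e with _ | _ <;> rcases hl : ((lowKey e).length == L) with _ | _ <;>
            simp_all [List.mem_cons]
        rwa [hZ]
    · have hstep : altHitsStep l pos (h0, d) L = (h0, d) := by
        simp only [altHitsStep]
        rw [if_neg hcond]
      have hnone : ∀ e ∈ R, (matchB l pos e && ((lowKey e).length == L)) = false := by
        intro e he
        by_contra hne
        have htrue : (matchB l pos e && ((lowKey e).length == L)) = true := by
          cases h : (matchB l pos e && ((lowKey e).length == L))
          · exact absurd h hne
          · rfl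
        simp only [Bool.and_eq_true, Nat.beq_eq_true_eq, matchB, PySem.Chars.startswith_iff] at htrue
        obtain ⟨hpre, hlen⟩ := htrue
        have hlp : L ≤ (l.drop pos).length := by
          have := hpre.length_le
          omega
        have hchlen : ((l.drop pos).take L).length = L := by
          rw [List.length_take]
          omega
        have hche : lowKey e = (l.drop pos).take L := by
          have := List.prefix_iff_eq_take.mp hpre
          rwa [hlen] at this
        have hcont : d.contains ((l.drop pos).take L) = true := by
          rw [hG.2]
          have hmem : e ∈ R.filter (fun x => lowKey x == (l.drop pos).take L) :=
            List.mem_filter.mpr ⟨he, by simp [hche]⟩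
          rcases h2 : (R.filter (fun x => lowKey x == (l.drop pos).take L)).isEmpty with _ | _
          · rfl
          · rw [List.isEmpty_iff] at h2; rw [h2] at hmem; simp at hmem
        exact hcond ⟨hchlen, hcont⟩
      obtain ⟨E, d', hfold, hperm, hG'⟩ := ih R d h0 hG
      have hP : R.filter (fun e => matchB l pos e && decide ((lowKey e).length ∈ L :: Ls))
          = R.filter (fun e => matchB l pos e && decide ((lowKey e).length ∈ Ls)) := by
        apply List.filter_congr
        intro e he
        have := hnone e he
        rcases hm : matchB l pos e with _ | _ <;> rcases hl : ((lowKey e).length == L) with _ | _ <;>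
          simp_all [List.mem_cons]
      have hQ : R.filter (fun e => !(matchB l pos e && decide ((lowKey e).length ∈ L :: Ls)))
          = R.filter (fun e => !(matchB l pos e && decide ((lowKey e).length ∈ Ls))) := by
        apply List.filter_congr
        intro e he
        have := hnone e he
        rcases hm : matchB l pos e with _ | _ <;> rcases hl : ((lowKey e).length == L) with _ | _ <;>
          simp_all [List.mem_cons]
      refine ⟨E, d', ?_, ?_, ?_⟩
      · rw [List.foldl_cons, hstep, hfold]
      · rwa [hP]
      · rwa [hQ]

lemma altScan_eq_buildP (l : List Char) (lengths : List Nat) :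
    ∀ (fuel pos : Nat) (R : List (Int × String))
      (d : PySem.Dict (List Char) (List (Int × String))) (res : List String),
      GoodDict R d →
      R.Pairwise (fun a b => a.1 < b.1) →
      (∀ e ∈ R, ∀ i < pos, ¬ lowKey e <+: l.drop i) →
      (∀ e ∈ R, (lowKey e).length ∈ lengths) →
      altScan l lengths fuel pos d res
        = res ++ buildP fuel (pos : Int)
            ((R.map (fun e => (e.2, lowKey e))).filterMap (gmap l)) := by
  intro fuel
  induction fuel with
  | zero => intro pos R d res _ _ _ _; simp [altScan, buildP]
  | succ f ih =>
    intro pos R d res hG hPW hI2 hI3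
    by_cases hE : d.items.isEmpty
    · have hR : R = [] := good_empty R d hG hE
      subst hR
      simp [altScan, hE, buildP_nil]
    · obtain ⟨E, d', hfold, hperm, hG'⟩ := fold_hits l pos lengths R d [] hG
      have hlen : ∀ e ∈ R, decide ((lowKey e).length ∈ lengths) = true := by
        intro e he; simpa using hI3 e he
      have hpermW : E.Perm (R.filter (matchB l pos)) := by
        refine hperm.trans (List.Perm.of_eq ?_)
        apply List.filter_congr
        intro e he
        rw [hlen e he]
        simp
      have hG'' : GoodDict (R.filter (fun e => !matchB l pos e)) d' := by
        have : R.filter (fun e => !(matchB l pos e && decide ((lowKey e).length ∈ lengths)))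
            = R.filter (fun e => !matchB l pos e) := by
          apply List.filter_congr
          intro e he
          rw [hlen e he]
          simp
        rwa [this] at hG'
      have hsort : PySem.List.sorted E (fun hit => hit.1) false = R.filter (matchB l pos) :=
        PySem.List.sorted_eq_of_perm_of_pairwise_lt _ _ _ hpermW.symm (hPW.filter _)
      have hstep : altScan l lengths (f + 1) pos d res
          = altScan l lengths f (pos + 1) d'
              (res ++ (R.filter (matchB l pos)).map (fun hit => hit.2)) := by
        simp only [altScan, hE]
        rw [if_neg (by simp)]
        have hst : lengths.foldl (altHitsStep l pos) ([], d) = (E, d') := by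
          rw [hfold]; rfl
        rw [hst]
        simp only [hsort]
      rw [hstep, ih (pos + 1) (R.filter (fun e => !matchB l pos e)) d'
            (res ++ (R.filter (matchB l pos)).map (fun hit => hit.2)) hG''
            (hPW.filter _)
            ?_ ?_]
      · obtain ⟨h1, h2⟩ := filter_gmap l pos (R.map (fun e => (e.2, lowKey e)))
          (by
            intro p hp i hi
            obtain ⟨e, he, rfl⟩ := List.mem_map.mp hp
            exact hI2 e he i hi)
        have hmapfilter : (R.map (fun e => (e.2, lowKey e))).filter
              (fun p => PySem.Chars.startswith (l.drop pos) p.2)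
            = (R.filter (matchB l pos)).map (fun e => (e.2, lowKey e)) := by
          rw [List.filter_map]
          rfl
        have hmapfilter2 : (R.filter (fun e => !matchB l pos e)).map (fun e => (e.2, lowKey e))
            = (R.map (fun e => (e.2, lowKey e))).filter
                (fun p => !PySem.Chars.startswith (l.drop pos) p.2) := by
          rw [List.filter_map]
          rfl
        rw [hmapfilter2, h2]
        simp only [buildP]
        rw [List.append_assoc]
        congr 2
        rw [h1, hmapfilter, List.map_map]
        rfl
      · intro e he i hi
        have hmem := List.mem_of_mem_filter he
        rcases Nat.lt_succ_iff_lt_or_eq.mp hi with h | h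
        · exact hI2 e hmem i h
        · subst h
          have := List.of_mem_filter he
          simp only [Bool.not_eq_true'] at this
          rw [← PySem.Chars.startswith_iff]
          simp only [matchB] at this
          simp [this]
      · intro e he
        exact hI3 e (List.mem_of_mem_filter he)

theorem detect_unions_spec : Claim_equal_detect_unions := by
  intro query known_unions _
  unfold Spec_detect_unions detect_unions detect_unions_alt
  simp only [PySem.Str.find_eq, PySem.Str.toList_lower]
  have hfold : ∀ (xs : List (Int × String)) (init : List (Int × Int × String)),
      xs.foldl (fun acc p =>
          if PySem.Chars.find (PySem.Chars.lower query.toList) (PySem.Chars.lower p.2.toList) ≠ -1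
          then acc ++ [(PySem.Chars.find (PySem.Chars.lower query.toList) (PySem.Chars.lower p.2.toList), p.1, p.2)]
          else acc) init
        = init ++ (xs.filter (fun p => decide (PySem.Chars.find (PySem.Chars.lower query.toList) (PySem.Chars.lower p.2.toList) ≠ -1))).map
            (fun p => (PySem.Chars.find (PySem.Chars.lower query.toList) (PySem.Chars.lower p.2.toList), p.1, p.2)) := by
    intro xs init
    simpa using PySem.List.foldl_append_if
      (fun p : Int × String => decide (PySem.Chars.find (PySem.Chars.lower query.toList) (PySem.Chars.lower p.2.toList) ≠ -1))
      (fun p : Int × String => (PySem.Chars.find (PySem.Chars.lower query.toList) (PySem.Chars.lower p.2.toList), p.1, p.2)) xs init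
  rw [hfold, List.nil_append]
  have hb : ∀ t ∈ ((PySem.List.enumerate known_unions 0).filter
        (fun p => decide (PySem.Chars.find (PySem.Chars.lower query.toList) (PySem.Chars.lower p.2.toList) ≠ -1))).map
        (fun p => (PySem.Chars.find (PySem.Chars.lower query.toList) (PySem.Chars.lower p.2.toList), p.1, p.2)),
      0 ≤ t.1 ∧ t.1 ≤ ((PySem.Chars.lower query.toList).length : Int) := by
    intro t ht
    obtain ⟨p, hpmem, rfl⟩ := List.mem_map.mp ht
    have hcp := List.of_mem_filter hpmem
    simp only [decide_eq_true_eq] at hcp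
    have h1 := PySem.Chars.neg_one_le_find (PySem.Chars.lower query.toList) (PySem.Chars.lower p.2.toList)
    have h2 := PySem.Chars.find_le_length (PySem.Chars.lower query.toList) (PySem.Chars.lower p.2.toList)
    constructor <;> simp <;> omega
  have hpw : (((PySem.List.enumerate known_unions 0).filter
        (fun p => decide (PySem.Chars.find (PySem.Chars.lower query.toList) (PySem.Chars.lower p.2.toList) ≠ -1))).map
        (fun p => (PySem.Chars.find (PySem.Chars.lower query.toList) (PySem.Chars.lower p.2.toList), p.1, p.2))).Pairwise
      (fun a b => a.2.1 < b.2.1) := by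
    rw [List.pairwise_map]
    apply List.Pairwise.imp ?_ ((PySem.List.pairwise_lt_enumerate known_unions 0).filter _)
    intro a b hab
    simpa using hab
  rw [sorted2_eq_buildT _ (PySem.Chars.lower query.toList).length hb hpw, buildT_map]
  rw [altScan_eq_buildP (PySem.Chars.lower query.toList)
        (altLengths (altGroup known_unions)) ((PySem.Chars.lower query.toList).length + 1) 0
        (PySem.List.enumerate known_unions 0) (altGroup known_unions) []
        (group_good known_unions)
        (PySem.List.pairwise_lt_enumerate known_unions 0)
        (by intro e he i hi; omega)
        (fun e he => lengths_mem known_unions e he)]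
  rw [List.nil_append]
  have hP0 : (PySem.List.enumerate known_unions 0).map (fun e => (e.2, lowKey e))
      = known_unions.map (fun u => (u, PySem.Chars.lower u.toList)) := by
    conv_rhs => rw [← PySem.List.map_snd_enumerate known_unions 0, List.map_map]
    rfl
  rw [hP0]
  have hMP : ((((PySem.List.enumerate known_unions 0).filter
        (fun p => decide (PySem.Chars.find (PySem.Chars.lower query.toList) (PySem.Chars.lower p.2.toList) ≠ -1))).map
        (fun p => (PySem.Chars.find (PySem.Chars.lower query.toList) (PySem.Chars.lower p.2.toList), p.1, p.2))).map
        (fun t => (t.1, t.2.2)))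
      = (known_unions.map (fun u => (u, PySem.Chars.lower u.toList))).filterMap
          (gmap (PySem.Chars.lower query.toList)) := by
    rw [List.map_map, List.filterMap_map]
    have he := enum_proj (β := Int × String) known_unions 0
      (fun u => decide (PySem.Chars.find (PySem.Chars.lower query.toList) (PySem.Chars.lower u.toList) ≠ -1))
      (fun u => (PySem.Chars.find (PySem.Chars.lower query.toList) (PySem.Chars.lower u.toList), u))
    rw [show ((fun t : Int × Int × String => (t.1, t.2.2)) ∘
          (fun p : Int × String => (PySem.Chars.find (PySem.Chars.lower query.toList) (PySem.Chars.lower p.2.toList), p.1, p.2)))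
        = (fun p : Int × String => (PySem.Chars.find (PySem.Chars.lower query.toList) (PySem.Chars.lower p.2.toList), p.2)) from rfl]
    rw [he]
    congr 1
    funext u
    simp [gmap, Function.comp]
  rw [hMP]
  norm_num
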